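-- pv_equiv track=rewrite | github.com/aaboyarchukov/ASD_2 | Task11/python/graph_task11-2.py | _restore_cycle
-- ===== SOURCE A (Python) =====
-- def _restore_cycle(parent, v1, v2):
--     path1 = []
--     path2 = []
--
--     a, b = v1, v2
--     while a is not None:
--         path1.append(a)
--         a = parent.get(a)
--     while b is not None:
--         path2.append(b)
--         b = parent.get(b)
--
--     intersection = None
--     for x in path1:
--         if x in path2:
--             intersection = x
--             break
--     if intersection is None:
--         return None
--
--     path1 = path1[:path1.index(intersection) + 1]
--     path2 = path2[:path2.index(intersection)]
--     cycle = path1 + path2[::-1]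
--
--     cycle = sorted(cycle)
--     return cycle
-- ===== SOURCE B (Python) =====
-- def _restore_cycle(parent, v1, v2):
--     p1 = []
--     v = v1
--     while v is not None:
--         p1.append(v)
--         v = parent.get(v)
--     p2 = []
--     v = v2
--     while v is not None:
--         p2.append(v)
--         v = parent.get(v)
--
--     # length of the common suffix of the two chains, by comparing from the back
--     r1, r2 = p1[::-1], p2[::-1]
--     k = 0
--     while k < len(r1) and k < len(r2) and r1[k] == r2[k]:
--         k += 1
--
--     if k == 0:
--         return None
--     return sorted(p1[:len(p1) - k + 1] + p2[:len(p2) - k])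
-- ===== Notes on version B (the rewrite author's own statement) =====
-- stated objective: alternative
-- what changed: A scans path1 testing each node for membership in path2 and then runs two list.index passes; B instead finds the merge point in one back-to-front comparison (length of the common suffix of the two parent chains) and slices both chains by that length, so the inner membership scan and both index passes disappear.
import Mathlib
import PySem

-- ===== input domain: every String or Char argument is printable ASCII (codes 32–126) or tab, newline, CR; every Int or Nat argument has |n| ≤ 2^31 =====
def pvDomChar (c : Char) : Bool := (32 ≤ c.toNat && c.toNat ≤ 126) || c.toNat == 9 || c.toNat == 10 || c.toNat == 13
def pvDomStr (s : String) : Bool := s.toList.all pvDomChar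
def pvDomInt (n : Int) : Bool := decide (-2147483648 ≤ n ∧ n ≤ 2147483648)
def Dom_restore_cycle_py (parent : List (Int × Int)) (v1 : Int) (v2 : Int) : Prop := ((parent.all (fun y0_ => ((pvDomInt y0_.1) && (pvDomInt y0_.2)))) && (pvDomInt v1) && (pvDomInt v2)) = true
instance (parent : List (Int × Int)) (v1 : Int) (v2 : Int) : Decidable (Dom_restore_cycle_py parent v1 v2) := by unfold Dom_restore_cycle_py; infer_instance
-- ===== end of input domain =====

-- B replaces A's quadratic "scan path1 testing membership in path2 (+ two .index passes)"
-- by a single back-to-front common-suffix comparison of the two chains (objective: alternative).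

-- ===== PORT A =====
-- one lookup step: a = parent.get(a) (None stays None)
def pvStep (parent : List (Int × Int)) (o : Option Int) : Option Int :=
  o.bind (fun a => (PySem.Dict.mk parent).get? a)

-- the 'while a is not None: path.append(a); a = parent.get(a)' loop; fuel parent.length + 1
-- suffices under Pre_ (the chain terminates, hence visits pairwise-distinct keys)
def pvChain (parent : List (Int × Int)) : Nat → Option Int → List Int
  | 0, _ => []
  | _ + 1, none => []
  | f + 1, some a => a :: pvChain parent f (pvStep parent (some a))

def restore_cycle_py (parent : List (Int × Int)) (v1 : Int) (v2 : Int) : Option (List Int) :=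
  let path1 := pvChain parent (parent.length + 1) (some v1)
  let path2 := pvChain parent (parent.length + 1) (some v2)
  match path1.find? (fun x => path2.contains x) with  -- the for-loop with break
  | none => none
  | some inter =>
    -- path1[:path1.index(inter) + 1]; .index never raises here since inter ∈ path1
    let i1 := (PySem.List.index? path1 inter).getD 0
    let i2 := (PySem.List.index? path2 inter).getD 0
    some (PySem.List.sorted (path1.take (i1 + 1) ++ (path2.take i2).reverse) (fun x => x) false)

-- ===== PORT B =====
-- length of the common prefix of two lists (B compares the reversed chains front-to-front)
def pvLcp : List Int → List Int → Nat
  | a :: as, b :: bs => if a = b then pvLcp as bs + 1 else 0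
  | _, _ => 0

def restore_cycle_py_alt (parent : List (Int × Int)) (v1 : Int) (v2 : Int) : Option (List Int) :=
  let p1 := pvChain parent (parent.length + 1) (some v1)
  let p2 := pvChain parent (parent.length + 1) (some v2)
  let k := pvLcp p1.reverse p2.reverse
  if k = 0 then none
  else some (PySem.List.sorted (p1.take (p1.length - k + 1) ++ p2.take (p2.length - k)) (fun x => x) false)

-- ===== PRECONDITION & SPEC =====
-- Pre_ excludes exactly the inputs where a parent chain from v1 or v2 cycles, i.e. where
-- Python A loops forever: a terminating chain escapes the key set within parent.length + 1 steps.
def Pre_restore_cycle_py (parent : List (Int × Int)) (v1 : Int) (v2 : Int) : Prop :=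
  (pvStep parent)^[parent.length + 1] (some v1) = none ∧
  (pvStep parent)^[parent.length + 1] (some v2) = none
instance (parent : List (Int × Int)) (v1 : Int) (v2 : Int) : Decidable (Pre_restore_cycle_py parent v1 v2) := by unfold Pre_restore_cycle_py; infer_instance

def pvWitness_restore_cycle_py : (List (Int × Int)) × Int × Int := ([(1, 3), (2, 3)], 1, 2)

def Spec_restore_cycle_py (parent : List (Int × Int)) (v1 : Int) (v2 : Int) (out : Option (List Int)) : Prop := out = restore_cycle_py_alt parent v1 v2
instance (parent : List (Int × Int)) (v1 : Int) (v2 : Int) (out : Option (List Int)) : Decidable (Spec_restore_cycle_py parent v1 v2 out) := by unfold Spec_restore_cycle_py; infer_instance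

-- ===== CLAIM (what is proved, stated in full; the proofs are below) =====
def Claim_equal_restore_cycle_py : Prop := ∀ (parent : List (Int × Int)) (v1 : Int) (v2 : Int), Dom_restore_cycle_py parent v1 v2 → Pre_restore_cycle_py parent v1 v2 → Spec_restore_cycle_py parent v1 v2 (restore_cycle_py parent v1 v2)

-- ===== LEMMAS AND PROOFS =====

theorem pvChain_none (parent : List (Int × Int)) (f : Nat) : pvChain parent f none = [] := by
  cases f <;> rfl

theorem pvStep_iterate_none (parent : List (Int × Int)) (i : Nat) :
    (pvStep parent)^[i] none = none :=
  Function.iterate_fixed rfl i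

theorem pvChain_drop (parent : List (Int × Int)) :
    ∀ (i f : Nat) (o : Option Int),
      (pvChain parent f o).drop i = pvChain parent (f - i) ((pvStep parent)^[i] o) := by
  intro i
  induction i with
  | zero => intro f o; simp
  | succ i ih =>
    intro f o
    cases o with
    | none => simp [pvChain_none, pvStep_iterate_none]
    | some a =>
      cases f with
      | zero => simp [pvChain]
      | succ f =>
        show (pvChain parent f (pvStep parent (some a))).drop i = _
        rw [ih f (pvStep parent (some a))]
        rw [Nat.succ_sub_succ, Function.iterate_succ_apply]

theorem pvChain_fuel_mono (parent : List (Int × Int)) :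
    ∀ (f : Nat) (o : Option Int), (pvStep parent)^[f] o = none →
      ∀ g, f ≤ g → pvChain parent g o = pvChain parent f o := by
  intro f
  induction f with
  | zero =>
    intro o h g _
    simp only [Function.iterate_zero, id] at h
    subst h; simp [pvChain_none]
  | succ f ih =>
    intro o h g hg
    cases o with
    | none => simp [pvChain_none]
    | some a =>
      obtain ⟨g, rfl⟩ := Nat.exists_eq_add_of_le hg
      show pvChain parent (f + 1 + g) (some a) = _
      have : f + 1 + g = (f + g) + 1 := by omega
      rw [this]
      show a :: pvChain parent (f + g) (pvStep parent (some a)) = a :: pvChain parent f (pvStep parent (some a))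
      rw [ih (pvStep parent (some a)) (by rwa [Function.iterate_succ_apply] at h) (f + g) (by omega)]

theorem pvChain_length_le (parent : List (Int × Int)) :
    ∀ (f : Nat) (o : Option Int), (pvChain parent f o).length ≤ f := by
  intro f
  induction f with
  | zero => intro o; simp [pvChain]
  | succ f ih =>
    intro o
    cases o with
    | none => simp [pvChain]
    | some a => simpa [pvChain] using ih (pvStep parent (some a))

theorem pvChain_getElem (parent : List (Int × Int)) (f : Nat) (o : Option Int)
    (i : Nat) (h : i < (pvChain parent f o).length) :
    (pvStep parent)^[i] o = some ((pvChain parent f o)[i]) := by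
  have hdrop := pvChain_drop parent i f o
  have hne : pvChain parent (f - i) ((pvStep parent)^[i] o) ≠ [] := by
    rw [← hdrop]
    intro hnil
    have := List.drop_eq_nil_iff.mp hnil
    omega
  cases hstep : (pvStep parent)^[i] o with
  | none => exact absurd (by rw [hstep]; exact pvChain_none _ _) hne
  | some a =>
    rw [hstep] at hdrop
    cases hf : f - i with
    | zero => rw [hf] at hdrop hne; exact absurd rfl hne
    | succ f' =>
      rw [hf] at hdrop
      have : (pvChain parent f o)[i] = a := by
        have : (pvChain parent f o).drop i = a :: pvChain parent f' (pvStep parent (some a)) := hdrop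
        have hget : ((pvChain parent f o).drop i)[0]'(by rw [this]; simp) = a := by
          simp [this]
        simpa using hget
      rw [this]

-- the chain from any element of a terminating chain terminates, and the two drops agree
theorem pvChain_common_suffix (parent : List (Int × Int)) (v1 v2 : Int)
    (h1 : (pvStep parent)^[parent.length + 1] (some v1) = none)
    (h2 : (pvStep parent)^[parent.length + 1] (some v2) = none)
    (i j : Nat)
    (hi : i < (pvChain parent (parent.length + 1) (some v1)).length)
    (hj : j < (pvChain parent (parent.length + 1) (some v2)).length)
    (hxy : (pvChain parent (parent.length + 1) (some v1))[i] = (pvChain parent (parent.length + 1) (some v2))[j]) :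
    (pvChain parent (parent.length + 1) (some v1)).drop i = (pvChain parent (parent.length + 1) (some v2)).drop j := by
  set n := parent.length + 1 with hn
  set x := (pvChain parent n (some v1))[i] with hx
  have hsi : (pvStep parent)^[i] (some v1) = some x := pvChain_getElem parent n (some v1) i hi
  have hsj : (pvStep parent)^[j] (some v2) = some x := by
    rw [hxy] at hx ⊢; exact pvChain_getElem parent n (some v2) j hj
  have hin : i ≤ n := le_of_lt (lt_of_lt_of_le hi (pvChain_length_le parent n (some v1)))
  have hjn : j ≤ n := le_of_lt (lt_of_lt_of_le hj (pvChain_length_le parent n (some v2)))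
  have hti : (pvStep parent)^[n - i] (some x) = none := by
    rw [← hsi, ← Function.iterate_add_apply]
    have : n - i + i = n := by omega
    rw [this]; exact h1
  have htj : (pvStep parent)^[n - j] (some x) = none := by
    rw [← hsj, ← Function.iterate_add_apply]
    have : n - j + j = n := by omega
    rw [this]; exact h2
  rw [pvChain_drop parent i n (some v1), hsi, pvChain_drop parent j n (some v2), hsj]
  rcases le_total (n - i) (n - j) with hle | hle
  · rw [pvChain_fuel_mono parent (n - i) (some x) hti (n - j) hle]
  · rw [pvChain_fuel_mono parent (n - j) (some x) htj (n - i) hle]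

theorem pvLcp_le_left : ∀ (a b : List Int), pvLcp a b ≤ a.length := by
  intro a
  induction a with
  | nil => intro b; simp [pvLcp]
  | cons x as ih =>
    intro b
    cases b with
    | nil => simp [pvLcp]
    | cons y bs =>
      simp only [pvLcp]
      split
      · simpa using ih bs
      · simp

theorem pvLcp_le_right : ∀ (a b : List Int), pvLcp a b ≤ b.length := by
  intro a
  induction a with
  | nil => intro b; simp [pvLcp]
  | cons x as ih =>
    intro b
    cases b with
    | nil => simp [pvLcp]
    | cons y bs =>
      simp only [pvLcp]
      split
      · simpa using ih bs
      · simp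

theorem pvLcp_take_eq : ∀ (a b : List Int), a.take (pvLcp a b) = b.take (pvLcp a b) := by
  intro a
  induction a with
  | nil => intro b; simp [pvLcp]
  | cons x as ih =>
    intro b
    cases b with
    | nil => simp [pvLcp]
    | cons y bs =>
      simp only [pvLcp]
      split
      · next heq => simp [heq, List.take_succ_cons, ih bs]
      · simp

theorem le_pvLcp : ∀ (m : Nat) (a b : List Int), a.take m = b.take m →
    m ≤ a.length → m ≤ b.length → m ≤ pvLcp a b := by
  intro m
  induction m with
  | zero => intro a b _ _ _; exact Nat.zero_le _
  | succ m ih =>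
    intro a b htake ha hb
    cases a with
    | nil => simp at ha
    | cons x as =>
      cases b with
      | nil => simp at hb
      | cons y bs =>
        simp only [List.take_succ_cons, List.cons.injEq] at htake
        obtain ⟨rfl, htake⟩ := htake
        have := ih as bs htake (by simpa using ha) (by simpa using hb)
        simp only [pvLcp]
        split
        · omega
        · next hne => exact (hne trivial).elim

-- generic: find? returns the element at the first index satisfying the predicate
theorem find?_eq_of_first (p : Int → Bool) :
    ∀ (l : List Int) (i0 : Nat) (h : i0 < l.length),
      (∀ i (hi : i < l.length), i < i0 → p l[i] = false) → p l[i0] = true →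
      l.find? p = some l[i0] := by
  intro l
  induction l with
  | nil => intro i0 h; simp at h
  | cons x t ih =>
    intro i0 h hbefore hat
    cases i0 with
    | zero =>
      simp only [List.getElem_cons_zero] at hat
      simp [List.find?, hat]
    | succ i0 =>
      have hx : p x = false := by
        have := hbefore 0 (by simp) (Nat.succ_pos i0)
        simpa using this
      simp only [List.find?, hx]
      have := ih i0 (by simpa using h)
        (fun i hi hlt => by
          have := hbefore (i + 1) (by simpa using hi) (by omega)
          simpa using this)
        (by simpa using hat)
      simpa using this

theorem mem_take_getElem {l : List Int} {m : Nat} {x : Int} (h : x ∈ l.take m) :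
    ∃ (i : Nat) (hi : i < l.length), i < m ∧ l[i] = x := by
  obtain ⟨i, hi, hx⟩ := List.getElem_of_mem h
  refine ⟨i, ?_, ?_, ?_⟩
  · exact lt_of_lt_of_le hi (by simp)
  · have := hi; simp [List.length_take] at this; omega
  · rw [← hx]; exact (List.getElem_take).symm

-- the heart of the equivalence: under Pre_, A's intersection scan finds exactly the
-- element at distance k (= common-suffix length) from each chain's end
theorem restore_cycle_eq (parent : List (Int × Int)) (v1 v2 : Int)
    (h1 : (pvStep parent)^[parent.length + 1] (some v1) = none)
    (h2 : (pvStep parent)^[parent.length + 1] (some v2) = none) :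
    restore_cycle_py parent v1 v2 = restore_cycle_py_alt parent v1 v2 := by
  set n := parent.length + 1 with hn
  set P1 := pvChain parent n (some v1) with hP1
  set P2 := pvChain parent n (some v2) with hP2
  set k := pvLcp P1.reverse P2.reverse with hk
  have hk1 : k ≤ P1.length := by simpa using pvLcp_le_left P1.reverse P2.reverse
  have hk2 : k ≤ P2.length := by simpa using pvLcp_le_right P1.reverse P2.reverse
  -- any common element sits within the last k of each chain
  have hmin : ∀ (i j : Nat) (hi : i < P1.length) (hj : j < P2.length), P1[i]'hi = P2[j]'hj →
      P1.length - i ≤ k ∧ P2.length - j ≤ k := by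
    intro i j hi hj hxy
    have hdropeq := pvChain_common_suffix parent v1 v2 h1 h2 i j hi hj hxy
    have hlen : P1.length - i = P2.length - j := by
      have := congrArg List.length hdropeq
      simpa using this
    have htk : P1.reverse.take (P1.length - i) = P2.reverse.take (P1.length - i) := by
      rw [List.take_reverse, List.take_reverse]
      have e1 : P1.length - (P1.length - i) = i := by omega
      have e2 : P2.length - (P1.length - i) = j := by omega
      rw [e1, e2, hdropeq]
    have hle := le_pvLcp (P1.length - i) P1.reverse P2.reverse htk
      (by simp) (by simp; omega)
    exact ⟨hle, by omega⟩
  by_cases hk0 : k = 0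
  · -- no common element: both return none
    have hfind : P1.find? (fun x => P2.contains x) = none := by
      apply List.find?_eq_none.mpr
      intro x hx
      obtain ⟨i, hi, rfl⟩ := List.getElem_of_mem hx
      have hnm : P1[i]'hi ∉ P2 := by
        intro hx2
        obtain ⟨j, hj, hx2e⟩ := List.getElem_of_mem hx2
        have := (hmin i j hi hj hx2e.symm).1
        omega
      simp [hnm]
    show restore_cycle_py parent v1 v2 = restore_cycle_py_alt parent v1 v2
    rw [restore_cycle_py, restore_cycle_py_alt]
    simp only [← hP1, ← hP2, ← hk, ← hn, hfind, hk0]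
    simp
  · -- common suffix of length k ≥ 1
    have hkpos : 0 < k := Nat.pos_of_ne_zero hk0
    have hi0 : P1.length - k < P1.length := by omega
    have hj0 : P2.length - k < P2.length := by omega
    have hsufeq : P1.drop (P1.length - k) = P2.drop (P2.length - k) := by
      have := pvLcp_take_eq P1.reverse P2.reverse
      rw [← hk, List.take_reverse, List.take_reverse] at this
      simpa [List.reverse_inj] using this
    have hx0 : P1[P1.length - k]'hi0 = P2[P2.length - k]'hj0 := by
      have h0 : (P1.drop (P1.length - k))[0]'(by simp; omega) =
          (P2.drop (P2.length - k))[0]'(by simp; omega) := by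
        simp [hsufeq]
      simpa using h0
    have hfind : P1.find? (fun x => P2.contains x) = some (P1[P1.length - k]'hi0) := by
      apply find?_eq_of_first
      · intro i hi hlt
        have hnm : P1[i]'hi ∉ P2 := by
          intro hx2
          obtain ⟨j, hj, hx2e⟩ := List.getElem_of_mem hx2
          have := (hmin i j hi hj hx2e.symm).1
          omega
        simp [hnm]
      · have hm : P1[P1.length - k]'hi0 ∈ P2 := by
          rw [hx0]; exact List.getElem_mem hj0
        simp [hm]
    have hnotpre1 : P1[P1.length - k]'hi0 ∉ P1.take (P1.length - k) := by
      intro hmem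
      obtain ⟨i, hi, hlt, hieq⟩ := mem_take_getElem hmem
      have heq2 : P1[i]'hi = P2[P2.length - k]'hj0 := by rw [hieq, hx0]
      have := (hmin i (P2.length - k) hi hj0 heq2).1
      omega
    have hnotpre2 : P1[P1.length - k]'hi0 ∉ P2.take (P2.length - k) := by
      intro hmem
      obtain ⟨j, hj, hlt, hjeq⟩ := mem_take_getElem hmem
      have heq2 : P1[P1.length - k]'hi0 = P2[j]'hj := hjeq.symm
      have := (hmin (P1.length - k) j hi0 hj heq2).2
      omega
    have hidx1 : PySem.List.index? P1 (P1[P1.length - k]'hi0) = some (P1.length - k) := by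
      apply (PySem.List.index?_eq_some_iff _ _ _).mpr
      refine ⟨P1.take (P1.length - k), P1.drop (P1.length - k + 1), ?_, by simp, hnotpre1⟩
      conv_lhs => rw [← List.take_append_drop (P1.length - k) P1]
      rw [List.drop_eq_getElem_cons hi0]
    have hidx2 : PySem.List.index? P2 (P1[P1.length - k]'hi0) = some (P2.length - k) := by
      apply (PySem.List.index?_eq_some_iff _ _ _).mpr
      refine ⟨P2.take (P2.length - k), P2.drop (P2.length - k + 1), ?_, by simp, hnotpre2⟩
      conv_lhs => rw [← List.take_append_drop (P2.length - k) P2]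
      rw [List.drop_eq_getElem_cons hj0, hx0]
    show restore_cycle_py parent v1 v2 = restore_cycle_py_alt parent v1 v2
    rw [restore_cycle_py, restore_cycle_py_alt]
    simp only [← hP1, ← hP2, ← hk, ← hn, hfind, hidx1, hidx2, if_neg hk0, Option.getD_some]
    congr 1
    apply PySem.List.sorted_eq_sorted_of_perm _ _ (fun x => x) (fun _ _ h => h)
    exact List.Perm.append_left _ (List.reverse_perm _)

-- ===== VERDICT (by name: the statement is the Claim_ definition above) =====
theorem restore_cycle_py_spec : Claim_equal_restore_cycle_py := by
  intro parent v1 v2 _ hpre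
  exact restore_cycle_eq parent v1 v2 hpre.1 hpre.2
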